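-- pv_equiv track=rewrite | github.com/xiaobingling93-pixel/Ascend-msinsight | test/smoke-test/AISBench_Smoke_Backup/scripts/manage_label.py | preprocess_list
-- ===== SOURCE A (Python) =====
-- def preprocess_list(tags_to_add, tags_to_remove):
--     """处理列表类型的标签添加/移除"""
--     # 确保列表类型（如果为None则转为空列表）
--     tags_to_add = tags_to_add or []
--     tags_to_remove = tags_to_remove or []
--
--     # 找出冲突元素（同时出现在添加和删除中）
--     if tags_to_add and tags_to_remove:
--         conflict_items = set(tags_to_add) & set(tags_to_remove)
--         # 移除冲突元素
--         tags_to_add = [item for item in tags_to_add if item not in conflict_items]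
--         tags_to_remove = [item for item in tags_to_remove if item not in conflict_items]
--
--     # 列表内部去重（保持顺序）
--     tags_to_add = list(dict.fromkeys(tags_to_add)) if tags_to_add else None
--     tags_to_remove = list(dict.fromkeys(tags_to_remove)) if tags_to_remove else None
--
--     return tags_to_add, tags_to_remove
-- ===== SOURCE B (Python) =====
-- def _clean(items, conflict):
--     """Single pass: keep each item once, skipping conflicts; empty -> None."""
--     seen = set()
--     result = []
--     for x in items:
--         if x not in conflict and x not in seen:
--             seen.add(x)
--             result.append(x)
--     return result or None
--
--
-- def preprocess_list(tags_to_add, tags_to_remove):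
--     tags_to_add = tags_to_add or []
--     tags_to_remove = tags_to_remove or []
--     if tags_to_add and tags_to_remove:
--         conflict = set(tags_to_add) & set(tags_to_remove)
--     else:
--         conflict = set()
--     return _clean(tags_to_add, conflict), _clean(tags_to_remove, conflict)
-- ===== Notes on version B (the rewrite author's own statement) =====
-- stated objective: simpler
-- what changed: A filters conflicts in a comprehension and then deduplicates via dict.fromkeys (two passes per list); B makes one fused pass per list with an explicit seen-set accumulator that drops conflicts and duplicates together, returning 'result or None'.
import Mathlib
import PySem

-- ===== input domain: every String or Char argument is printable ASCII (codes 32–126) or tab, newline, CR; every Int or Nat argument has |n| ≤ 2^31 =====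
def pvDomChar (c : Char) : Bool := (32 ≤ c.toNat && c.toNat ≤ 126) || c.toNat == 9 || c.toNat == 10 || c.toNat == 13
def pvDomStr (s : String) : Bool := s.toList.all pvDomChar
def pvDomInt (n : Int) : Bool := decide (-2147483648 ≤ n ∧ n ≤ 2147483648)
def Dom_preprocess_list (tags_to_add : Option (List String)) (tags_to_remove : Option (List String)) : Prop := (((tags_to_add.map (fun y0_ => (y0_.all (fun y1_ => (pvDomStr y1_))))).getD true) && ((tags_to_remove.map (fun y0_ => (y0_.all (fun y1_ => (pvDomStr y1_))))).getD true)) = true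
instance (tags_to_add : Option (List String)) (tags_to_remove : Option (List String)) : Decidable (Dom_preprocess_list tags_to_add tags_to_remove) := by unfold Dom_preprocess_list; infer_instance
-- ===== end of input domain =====

-- B fuses A's conflict-filter comprehension and dict.fromkeys dedup into one seen-set
-- accumulator pass per list ("simpler"); same return values everywhere.

-- ===== PORT A =====
def preprocess_list (tags_to_add : Option (List String)) (tags_to_remove : Option (List String)) : Option (List String) × Option (List String) :=
  let a := tags_to_add.getD []        -- tags_to_add or []
  let r := tags_to_remove.getD []     -- tags_to_remove or []
  let pr :=
    if a ≠ [] ∧ r ≠ [] then           -- if tags_to_add and tags_to_remove: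
      let conflict := PySem.Set.inter (PySem.Set.ofList a) (PySem.Set.ofList r)
      (a.filter (fun item => !(PySem.Set.contains conflict item)),
       r.filter (fun item => !(PySem.Set.contains conflict item)))
    else (a, r)
  let aOut := if pr.1 ≠ [] then some (PySem.List.dedup pr.1) else none   -- list(dict.fromkeys(..)) if .. else None
  let rOut := if pr.2 ≠ [] then some (PySem.List.dedup pr.2) else none
  (aOut, rOut)

-- ===== PORT B =====
-- _clean: one pass with (seen, result) accumulator; 'result or None'
def pvClean (items : List String) (conflict : PySem.Set String) : Option (List String) :=
  let st := items.foldl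
    (fun (st : PySem.Set String × List String) x =>
      if !(PySem.Set.contains conflict x) && !(PySem.Set.contains st.1 x) then
        (PySem.Set.add st.1 x, st.2 ++ [x])
      else st)
    (PySem.Set.empty, [])
  if st.2 = [] then none else some st.2

def preprocess_list_alt (tags_to_add : Option (List String)) (tags_to_remove : Option (List String)) : Option (List String) × Option (List String) :=
  let a := tags_to_add.getD []
  let r := tags_to_remove.getD []
  let conflict :=
    if a ≠ [] ∧ r ≠ [] then PySem.Set.inter (PySem.Set.ofList a) (PySem.Set.ofList r)
    else PySem.Set.empty
  (pvClean a conflict, pvClean r conflict)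

-- ===== PRECONDITION & SPEC =====
def Spec_preprocess_list (tags_to_add : Option (List String)) (tags_to_remove : Option (List String)) (out : Option (List String) × Option (List String)) : Prop := out = preprocess_list_alt tags_to_add tags_to_remove
instance (tags_to_add : Option (List String)) (tags_to_remove : Option (List String)) (out : Option (List String) × Option (List String)) : Decidable (Spec_preprocess_list tags_to_add tags_to_remove out) := by unfold Spec_preprocess_list; infer_instance

-- ===== CLAIM (what is proved, stated in full; the proofs are below) =====
def Claim_equal_preprocess_list : Prop := ∀ (tags_to_add : Option (List String)) (tags_to_remove : Option (List String)), Dom_preprocess_list tags_to_add tags_to_remove → Spec_preprocess_list tags_to_add tags_to_remove (preprocess_list tags_to_add tags_to_remove)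

-- ===== LEMMAS AND PROOFS =====

-- B's fused fold, from a diagonal state (s, s), equals (t, t) where t is
-- A's "filter conflicts first, then fold Set.add" result.
theorem pvClean_fold_diag (conflict : PySem.Set String) :
    ∀ (xs : List String) (s : List String),
      xs.foldl
        (fun (st : PySem.Set String × List String) x =>
          if !(PySem.Set.contains conflict x) && !(PySem.Set.contains st.1 x) then
            (PySem.Set.add st.1 x, st.2 ++ [x])
          else st)
        (s, s)
      = (((xs.filter (fun x => !(PySem.Set.contains conflict x))).foldl PySem.Set.add s),
         ((xs.filter (fun x => !(PySem.Set.contains conflict x))).foldl PySem.Set.add s)) := by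
  intro xs
  induction xs with
  | nil => intro s; rfl
  | cons x t ih =>
    intro s
    by_cases hc : x ∈ conflict
    · simpa [List.foldl, List.filter, PySem.Set.contains, PySem.Set.add, hc] using ih s
    · by_cases hs : x ∈ s
      · simpa [List.foldl, List.filter, PySem.Set.contains, PySem.Set.add, hc, hs] using ih s
      · simpa [List.foldl, List.filter, PySem.Set.contains, PySem.Set.add, hc, hs] using ih (s ++ [x])

theorem foldl_add_ne_nil (x : String) (t : List String) (s : List String) :
    (x :: t).foldl PySem.Set.add s ≠ [] := by
  have hmem : x ∈ (x :: t).foldl PySem.Set.add s := by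
    have : x ∈ PySem.Set.update s (x :: t) := by
      rw [PySem.Set.mem_update]
      exact Or.inr (List.mem_cons_self ..)
    simpa [PySem.Set.update] using this
  intro h
  rw [h] at hmem
  exact absurd hmem (List.not_mem_nil)

-- pvClean computes A's per-list value: dedup of the conflict-filtered list, or none.
theorem pvClean_eq (xs : List String) (conflict : PySem.Set String) :
    pvClean xs conflict
      = (if (xs.filter (fun x => !(PySem.Set.contains conflict x))) ≠ [] then
           some (PySem.List.dedup (xs.filter (fun x => !(PySem.Set.contains conflict x))))
         else none) := by
  unfold pvClean
  rw [show (PySem.Set.empty : PySem.Set String) = ([] : List String) from rfl]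
  rw [pvClean_fold_diag]
  have hd : PySem.List.dedup (xs.filter (fun x => !(PySem.Set.contains conflict x)))
      = (xs.filter (fun x => !(PySem.Set.contains conflict x))).foldl PySem.Set.add [] := by
    rw [PySem.List.dedup_eq_ofList, PySem.Set.ofList_eq_foldl]
  rw [← PySem.Set.ofList_eq_foldl, hd, ← PySem.Set.ofList_eq_foldl]
  cases hf : xs.filter (fun x => !(PySem.Set.contains conflict x)) with
  | nil => simp [PySem.Set.ofList]
  | cons y t =>
    have hne : PySem.Set.ofList (y :: t) ≠ [] := by
      rw [PySem.Set.ofList_eq_foldl]; exact foldl_add_ne_nil y t []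
    simp [hne]

theorem filter_empty_conflict (xs : List String) :
    xs.filter (fun x => !(PySem.Set.contains (PySem.Set.empty : PySem.Set String) x)) = xs := by
  simp [PySem.Set.empty, PySem.Set.contains]

-- ===== VERDICT (by name: the statement is the Claim_ definition above) =====
theorem preprocess_list_spec : Claim_equal_preprocess_list := by
  intro ta tr _
  unfold Spec_preprocess_list preprocess_list preprocess_list_alt
  set a := ta.getD [] with ha
  set r := tr.getD [] with hr
  by_cases hg : a ≠ [] ∧ r ≠ []
  · simp only [if_pos hg, pvClean_eq]
  · simp only [if_neg hg, pvClean_eq, filter_empty_conflict]
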